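-- pv_equiv track=rewrite | github.com/LIKELION-HUFS-11th/Algorithm | 3팀/양효빈/binary_search/BJ2805.py | cutter
-- ===== SOURCE A (Python) =====
-- def cutter(tree_arr, needed_tree):
--     left, right = 0, max(tree_arr)
--
--     while left <= right:
--         # 절단기 높이
--         mid = (left + right) // 2
--         total = 0
--         # 자른 나무의 높이 합
--         for tree in tree_arr:
--             if (tree - mid) > 0:
--                 total += (tree - mid)
--
--         # 절단기 높이를 높여야 하는 경우
--         if total >= needed_tree:
--             left = mid + 1
--         # 절단기 높이를 낮춰야 하는 경우
--         else:
--             right = mid - 1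
--
--     return right
-- ===== SOURCE B (Python) =====
-- def cutter(tree_arr, needed_tree):
--     # Same binary search over cutter heights, but the per-height linear scan is
--     # replaced by a one-time sort + prefix-sum table and an O(log n) bisect.
--     right = max(tree_arr)
--     s = sorted(tree_arr)
--     n = len(s)
--     # prefix[i] == sum of s[:i]
--     prefix = [0]
--     acc = 0
--     for v in s:
--         acc += v
--         prefix.append(acc)
--     left = 0
--     while left <= right:
--         mid = (left + right) // 2
--         # idx = bisect_right(s, mid): first index whose tree is strictly taller than mid
--         lo, hi = 0, n
--         while lo < hi:
--             m = (lo + hi) // 2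
--             if mid < s[m]:
--                 hi = m
--             else:
--                 lo = m + 1
--         idx = lo
--         total = (prefix[n] - prefix[idx]) - mid * (n - idx)
--         if total >= needed_tree:
--             left = mid + 1
--         else:
--             right = mid - 1
--     return right
-- ===== Notes on version B (the rewrite author's own statement) =====
-- stated objective: faster
-- what changed: The per-iteration linear scan summing (tree-mid) over all trees is replaced by a one-time sort + prefix-sum table and a hand-written bisect_right, so each binary-search step costs O(log n) instead of O(n).
import Mathlib
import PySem

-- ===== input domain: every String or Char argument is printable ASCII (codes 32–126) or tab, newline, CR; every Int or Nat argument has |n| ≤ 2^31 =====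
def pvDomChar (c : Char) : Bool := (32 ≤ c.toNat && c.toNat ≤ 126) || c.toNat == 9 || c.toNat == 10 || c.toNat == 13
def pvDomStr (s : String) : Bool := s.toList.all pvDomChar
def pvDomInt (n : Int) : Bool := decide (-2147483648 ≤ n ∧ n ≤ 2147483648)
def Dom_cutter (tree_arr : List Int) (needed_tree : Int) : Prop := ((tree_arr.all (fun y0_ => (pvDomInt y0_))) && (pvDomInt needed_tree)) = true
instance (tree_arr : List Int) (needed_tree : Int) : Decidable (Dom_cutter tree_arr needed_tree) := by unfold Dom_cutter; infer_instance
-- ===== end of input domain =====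

-- B replaces A's per-height linear scan by a one-time sort + prefix-sum table and a bisect (objective: faster).

-- ===== PORT A =====
-- the inner 'for tree in tree_arr' scan of A
def cutterTotal (tree_arr : List Int) (mid : Int) : Int :=
  tree_arr.foldl (fun total tree => if tree - mid > 0 then total + (tree - mid) else total) 0

-- the 'while left <= right' loop of A (fuel = the interval length, which strictly
-- shrinks each iteration, so the fuel-out branch is never the one that answers)
def cutterLoop (tree_arr : List Int) (needed_tree : Int) : Nat → Int → Int → Int
  | 0, _, right => right
  | fuel + 1, left, right =>
    if left ≤ right then
      let mid := PySem.Int.floordiv (left + right) 2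
      if cutterTotal tree_arr mid ≥ needed_tree then
        cutterLoop tree_arr needed_tree fuel (mid + 1) right
      else
        cutterLoop tree_arr needed_tree fuel left (mid - 1)
    else right

def cutter (tree_arr : List Int) (needed_tree : Int) : Int :=
  match PySem.List.max? tree_arr (fun y => y) with   -- max(tree_arr); none = ValueError, excluded by Pre_
  | none => 0
  | some r => cutterLoop tree_arr needed_tree (r + 1).toNat 0 r

-- ===== PORT B =====
-- B's prefix-sum build: prefix = [0]; acc = 0; for v in s: acc += v; prefix.append(acc)
def prefixSumsB (s : List Int) : List Int :=
  (s.foldl (fun (q : List Int × Int) v => (q.1 ++ [q.2 + v], q.2 + v)) ([0], 0)).1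

-- B's 'while left <= right' loop; the inner lo/hi loop of Source B is exactly bisect_right,
-- ported as PySem.List.bisectRight (the SAME loop: m=(lo+hi)//2; hi=m if mid<s[m] else lo=m+1)
def cutterAltLoop (s : List Int) (pfx : List Int) (needed_tree : Int) : Nat → Int → Int → Int
  | 0, _, right => right
  | fuel + 1, left, right =>
    if left ≤ right then
      let mid := PySem.Int.floordiv (left + right) 2
      let idx : Nat := PySem.List.bisectRight s mid
      let total : Int := (pfx.getD s.length 0 - pfx.getD idx 0) - mid * ((s.length : Int) - (idx : Int))
      if total ≥ needed_tree then
        cutterAltLoop s pfx needed_tree fuel (mid + 1) right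
      else
        cutterAltLoop s pfx needed_tree fuel left (mid - 1)
    else right

def cutter_alt (tree_arr : List Int) (needed_tree : Int) : Int :=
  match PySem.List.max? tree_arr (fun y => y) with   -- max(tree_arr); none = ValueError, excluded by Pre_
  | none => 0
  | some r =>
    let s := PySem.List.sorted tree_arr (fun x => x) false
    let pfx := prefixSumsB s
    cutterAltLoop s pfx needed_tree (r + 1).toNat 0 r

-- ===== PRECONDITION & SPEC =====
-- Pre_ excludes only the empty list, on which both A and B raise ValueError at max(tree_arr).
def Pre_cutter (tree_arr : List Int) (needed_tree : Int) : Prop := tree_arr ≠ []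
instance (tree_arr : List Int) (needed_tree : Int) : Decidable (Pre_cutter tree_arr needed_tree) := by unfold Pre_cutter; infer_instance
def pvWitness_cutter : List Int × Int := ([20, 15, 10, 17], 7)

def Spec_cutter (tree_arr : List Int) (needed_tree : Int) (out : Int) : Prop := out = cutter_alt tree_arr needed_tree
instance (tree_arr : List Int) (needed_tree : Int) (out : Int) : Decidable (Spec_cutter tree_arr needed_tree out) := by unfold Spec_cutter; infer_instance

-- ===== CLAIM (what is proved, stated in full; the proofs are below) =====
def Claim_equal_cutter : Prop := ∀ (tree_arr : List Int) (needed_tree : Int), Dom_cutter tree_arr needed_tree → Pre_cutter tree_arr needed_tree → Spec_cutter tree_arr needed_tree (cutter tree_arr needed_tree)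

-- ===== LEMMAS AND PROOFS =====

-- A's scan as a sum over a map
theorem cutterTotal_foldl (mid : Int) : ∀ (l : List Int) (a : Int),
    l.foldl (fun total tree => if tree - mid > 0 then total + (tree - mid) else total) a
      = a + (l.map (fun t => if t - mid > 0 then t - mid else 0)).sum := by
  intro l
  induction l with
  | nil => intro a; simp
  | cons x t ih =>
    intro a
    simp only [List.foldl_cons, List.map_cons, List.sum_cons, ih]
    split_ifs <;> ring

theorem sum_map_sub (mid : Int) (l : List Int) :
    (l.map (fun x => x - mid)).sum = l.sum - mid * (l.length : Int) := by
  induction l with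
  | nil => simp
  | cons x t ih =>
    simp only [List.map_cons, List.sum_cons, List.length_cons, ih]
    push_cast; ring

-- running prefix sums, proof-side characterisation of prefixSumsB's fold
def pref (a : Int) : List Int → List Int
  | [] => []
  | v :: t => (a + v) :: pref (a + v) t

theorem prefixSumsB_fold : ∀ (s p : List Int) (a : Int),
    (s.foldl (fun (q : List Int × Int) v => (q.1 ++ [q.2 + v], q.2 + v)) (p, a))
      = (p ++ pref a s, a + s.sum) := by
  intro s
  induction s with
  | nil => intro p a; simp [pref]
  | cons v t ih =>
    intro p a
    simp only [List.foldl_cons, ih, pref, List.sum_cons, Prod.mk.injEq]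
    exact ⟨by simp, by ring⟩

theorem pref_getD : ∀ (s : List Int) (a : Int) (k : Nat), k < s.length →
    (pref a s).getD k 0 = a + (s.take (k + 1)).sum := by
  intro s
  induction s with
  | nil => intro a k hk; simp at hk
  | cons v t ih =>
    intro a k hk
    cases k with
    | zero => simp [pref]
    | succ k' =>
      simp only [pref, List.getD_cons_succ, List.take_succ_cons, List.sum_cons]
      rw [ih (a + v) k' (by simpa using hk)]
      ring

theorem prefixSumsB_getD (s : List Int) (k : Nat) (hk : k ≤ s.length) :
    (prefixSumsB s).getD k 0 = (s.take k).sum := by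
  unfold prefixSumsB
  have := prefixSumsB_fold s [0] 0
  rw [this]
  cases k with
  | zero => simp
  | succ k' =>
    have hk' : k' < s.length := by omega
    simp only [List.cons_append, List.nil_append]
    show (0 :: pref 0 s).getD (k' + 1) 0 = _
    rw [List.getD_cons_succ, pref_getD s 0 k' hk']
    ring

-- the heart: A's scan total equals B's prefix/bisect total, for every mid
theorem total_eq (tree_arr : List Int) (mid : Int) :
    cutterTotal tree_arr mid =
      ((prefixSumsB (PySem.List.sorted tree_arr (fun x => x) false)).getD (PySem.List.sorted tree_arr (fun x => x) false).length 0
        - (prefixSumsB (PySem.List.sorted tree_arr (fun x => x) false)).getD (PySem.List.bisectRight (PySem.List.sorted tree_arr (fun x => x) false) mid) 0)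
        - mid * (((PySem.List.sorted tree_arr (fun x => x) false).length : Int) - ((PySem.List.bisectRight (PySem.List.sorted tree_arr (fun x => x) false) mid) : Int)) := by
  set s := PySem.List.sorted tree_arr (fun x => x) false with hs
  set k := PySem.List.bisectRight s mid with hkdef
  obtain ⟨hk, hlo, hhi⟩ := PySem.List.bisectRight_spec s mid
    (by simpa using PySem.List.sorted_pairwise tree_arr (fun x => x))
  set g : Int → Int := fun t => if t - mid > 0 then t - mid else 0 with hg
  -- A's total as a sum over the sorted list
  have h1 : cutterTotal tree_arr mid = (s.map g).sum := by
    rw [cutterTotal, cutterTotal_foldl mid tree_arr 0, zero_add]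
    exact (List.Perm.sum_eq (List.Perm.map g (PySem.List.sorted_perm tree_arr (fun x => x) false))).symm
  -- split at k
  have hsplit : s = s.take k ++ s.drop k := (List.take_append_drop k s).symm
  have htake0 : ((s.take k).map g).sum = 0 := by
    apply List.sum_eq_zero
    intro x hx
    simp only [List.mem_map] at hx
    obtain ⟨y, hy, hgy⟩ := hx
    rw [List.mem_iff_getElem] at hy
    obtain ⟨j, hj, hyj⟩ := hy
    have hjlen : j < s.length := by
      have := List.length_take_le k s; omega
    have hjk : j < k := by
      have := List.length_take (i := k) (l := s); omega
    have : y = s[j] := by rw [← hyj, List.getElem_take]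
    have hle : y ≤ mid := this ▸ hlo j hjlen hjk
    simp [hg] at hgy ⊢
    omega
  have hdrop : ((s.drop k).map g).sum = (s.drop k).sum - mid * ((s.drop k).length : Int) := by
    rw [← sum_map_sub mid]
    congr 1
    apply List.map_congr_left
    intro x hx
    rw [List.mem_iff_getElem] at hx
    obtain ⟨j, hj, hxj⟩ := hx
    have hjlen : k + j < s.length := by
      have := s.length_drop (i := k); omega
    have : x = s[k + j] := by rw [← hxj, List.getElem_drop]
    have hgt : mid < x := this ▸ hhi (k + j) hjlen (by omega)
    simp [hg]
    omega
  have hgetn : (prefixSumsB s).getD s.length 0 = s.sum := by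
    rw [prefixSumsB_getD s s.length le_rfl, List.take_length]
  have hgetk : (prefixSumsB s).getD k 0 = (s.take k).sum := prefixSumsB_getD s k hk
  have hsum : s.sum = (s.take k).sum + (s.drop k).sum := by
    conv_lhs => rw [hsplit]
    rw [List.sum_append]
  have hdl : ((s.drop k).length : Int) = (s.length : Int) - (k : Int) := by
    have := s.length_drop (i := k); omega
  have hmap : (s.map g).sum = ((s.take k).map g).sum + ((s.drop k).map g).sum := by
    conv_lhs => rw [hsplit]
    rw [List.map_append, List.sum_append]
  rw [h1, hmap, htake0, hdrop, hgetn, hgetk, hsum, hdl]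
  ring

theorem loop_eq (tree_arr : List Int) (needed_tree : Int) : ∀ (fuel : Nat) (left right : Int),
    cutterLoop tree_arr needed_tree fuel left right
      = cutterAltLoop (PySem.List.sorted tree_arr (fun x => x) false)
          (prefixSumsB (PySem.List.sorted tree_arr (fun x => x) false)) needed_tree fuel left right := by
  intro fuel
  induction fuel with
  | zero => intro left right; rfl
  | succ f ih =>
    intro left right
    rw [cutterLoop, cutterAltLoop]
    by_cases h : left ≤ right
    · simp only [h, if_true]
      rw [← total_eq tree_arr]
      by_cases hc : cutterTotal tree_arr (PySem.Int.floordiv (left + right) 2) ≥ needed_tree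
      · rw [if_pos hc, if_pos hc]; exact ih _ _
      · rw [if_neg hc, if_neg hc]; exact ih _ _
    · simp only [h, if_false]

-- ===== VERDICT (by name: the statement is the Claim_ definition above) =====
theorem cutter_spec : Claim_equal_cutter := by
  intro tree_arr needed_tree _hdom hpre
  unfold Spec_cutter cutter cutter_alt
  cases hm : PySem.List.max? tree_arr (fun y => y) with
  | none =>
    exact absurd ((PySem.List.max?_eq_none_iff _ _).mp hm) hpre
  | some r =>
    exact loop_eq tree_arr needed_tree (r + 1).toNat 0 r
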